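-- pv_equiv track=rewrite | github.com/BIOIN401/Project14-T2PW | src/draft_graph_render.py | _dot_label
-- ===== SOURCE A (Python) =====
-- def _dot_label(text: str, max_chars: int = 20) -> str:
--     """Word-wrap and escape for a plain DOT quoted string."""
--     text = text.strip()
--     if len(text) <= max_chars:
--         return text.replace('"', '\\"')
--     words = text.split()
--     lines, cur = [], ""
--     for w in words:
--         if cur and len(cur) + 1 + len(w) > max_chars:
--             lines.append(cur)
--             cur = w
--         else:
--             cur = (cur + " " + w).strip() if cur else w
--     if cur:
--         lines.append(cur)
--     return "\\n".join(ln.replace('"', '\\"') for ln in lines)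
-- ===== SOURCE B (Python) =====
-- def _dot_label(text: str, max_chars: int = 20) -> str:
--     """Word-wrap and escape for a plain DOT quoted string."""
--     text = text.strip()
--     if len(text) <= max_chars:
--         return text.replace('"', '\\"')
--     words = text.split()
--     lines = []
--     i, n = 0, len(words)
--     while i < n:
--         # take the longest greedy run of words starting at i that fits
--         width = len(words[i])
--         j = i + 1
--         while j < n and width + 1 + len(words[j]) <= max_chars:
--             width += 1 + len(words[j])
--             j += 1
--         lines.append(" ".join(words[i:j]))
--         i = j
--     return "\\n".join(ln.replace('"', '\\"') for ln in lines)
-- ===== Notes on version B (the rewrite author's own statement) =====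
-- stated objective: alternative
-- what changed: Replaces the accumulator-string fold (growing cur by repeated concatenation and re-strip per word) with an index-based greedy grouping that measures a run of words by summed lengths and joins each whole group at once; escaping and the short-text fast path are kept.
import Mathlib
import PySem

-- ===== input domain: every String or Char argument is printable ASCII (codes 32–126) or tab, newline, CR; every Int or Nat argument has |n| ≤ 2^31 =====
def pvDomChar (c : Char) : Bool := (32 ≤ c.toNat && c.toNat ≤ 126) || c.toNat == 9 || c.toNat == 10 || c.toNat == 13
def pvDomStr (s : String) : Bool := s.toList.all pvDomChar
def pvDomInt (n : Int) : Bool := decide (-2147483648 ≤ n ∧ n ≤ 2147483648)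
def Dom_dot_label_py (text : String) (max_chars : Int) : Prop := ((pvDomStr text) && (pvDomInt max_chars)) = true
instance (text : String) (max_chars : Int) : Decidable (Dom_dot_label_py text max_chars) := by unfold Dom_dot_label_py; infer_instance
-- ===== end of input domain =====

-- B replaces A's accumulator-string fold (growing `cur` word by word) with greedy
-- grouping of whole word runs measured by summed lengths (objective: alternative).

-- ===== PORT A =====
-- the body of A's for-loop (lines, cur accumulator)
def dotStepA (max_chars : Int) (s : List String × String) (w : String) : List String × String :=
  if s.2 ≠ "" ∧ PySem.Str.len s.2 + 1 + PySem.Str.len w > max_chars then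
    (s.1 ++ [s.2], w)
  else
    (s.1, if s.2 ≠ "" then PySem.Str.strip (s.2 ++ " " ++ w) else w)

def dot_label_py (text : String) (max_chars : Int) : String :=
  let t := PySem.Str.strip text
  if PySem.Str.len t ≤ max_chars then
    PySem.Str.replace t "\"" "\\\""
  else
    let words := PySem.Str.split₀ t
    let r := words.foldl (dotStepA max_chars) ([], "")
    let lines := if r.2 ≠ "" then r.1 ++ [r.2] else r.1
    PySem.Str.join "\\n" (lines.map (fun ln => PySem.Str.replace ln "\"" "\\\""))

-- ===== PORT B =====
-- inner while loop of B: extend the current group while the next word fits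
def dotTakeGreedy (max_chars : Int) (width : Int) : List String → List String × List String
  | [] => ([], [])
  | w :: rest =>
    if width + 1 + PySem.Str.len w ≤ max_chars then
      let p := dotTakeGreedy max_chars (width + 1 + PySem.Str.len w) rest
      (w :: p.1, p.2)
    else ([], w :: rest)

theorem dotTakeGreedy_snd_length (max_chars width : Int) (ws : List String) :
    (dotTakeGreedy max_chars width ws).2.length ≤ ws.length := by
  induction ws generalizing width with
  | nil => simp [dotTakeGreedy]
  | cons w rest ih =>
    simp only [dotTakeGreedy]
    split
    · exact ((ih _).trans (Nat.le_succ _))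
    · simp

-- outer while loop of B: one joined line per greedy group
def dotWrap (max_chars : Int) : List String → List String
  | [] => []
  | w :: rest =>
    let p := dotTakeGreedy max_chars (PySem.Str.len w) rest
    PySem.Str.join " " (w :: p.1) :: dotWrap max_chars p.2
termination_by ws => ws.length
decreasing_by
  exact Nat.lt_succ_of_le (dotTakeGreedy_snd_length _ _ _)

def dot_label_py_alt (text : String) (max_chars : Int) : String :=
  let t := PySem.Str.strip text
  if PySem.Str.len t ≤ max_chars then
    PySem.Str.replace t "\"" "\\\""
  else
    let lines := dotWrap max_chars (PySem.Str.split₀ t)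
    PySem.Str.join "\\n" (lines.map (fun ln => PySem.Str.replace ln "\"" "\\\""))

-- ===== PRECONDITION & SPEC =====
def Spec_dot_label_py (text : String) (max_chars : Int) (out : String) : Prop := out = dot_label_py_alt text max_chars
instance (text : String) (max_chars : Int) (out : String) : Decidable (Spec_dot_label_py text max_chars out) := by unfold Spec_dot_label_py; infer_instance

-- ===== CLAIM (what is proved, stated in full; the proofs are below) =====
def Claim_equal_dot_label_py : Prop := ∀ (text : String) (max_chars : Int), Dom_dot_label_py text max_chars → Spec_dot_label_py text max_chars (dot_label_py text max_chars)

-- ===== LEMMAS AND PROOFS =====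

-- a "word": nonempty, no whitespace characters
def goodW (l : List Char) : Prop := l ≠ [] ∧ ∀ c ∈ l, PySem.Chars.isspace c = false

theorem dotStepA_mk (mc : Int) (ls : List String) (cur w : String) :
    dotStepA mc (ls, cur) w =
      if cur ≠ "" ∧ PySem.Str.len cur + 1 + PySem.Str.len w > mc then (ls ++ [cur], w)
      else (ls, if cur ≠ "" then PySem.Str.strip (cur ++ " " ++ w) else w) := rfl

theorem split₀_go_good (s cur : List Char) (acc : List (List Char))
    (hcur : ∀ c ∈ cur, PySem.Chars.isspace c = false)
    (hacc : ∀ l ∈ acc, goodW l) :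
    ∀ l ∈ PySem.Chars.split₀.go s cur acc, goodW l := by
  induction s generalizing cur acc with
  | nil =>
    intro l hl
    simp only [PySem.Chars.split₀.go] at hl
    split at hl
    · exact hacc l (List.mem_reverse.mp hl)
    · rename_i hne
      rcases List.mem_cons.mp (List.mem_reverse.mp hl) with h | h
      · subst h
        refine ⟨by simpa using hne, ?_⟩
        intro c hc
        exact hcur c (List.mem_reverse.mp hc)
      · exact hacc l h
  | cons c rest ih =>
    intro l hl
    simp only [PySem.Chars.split₀.go] at hl
    split at hl
    · split at hl
      · exact ih [] acc (by simp) hacc l hl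
      · rename_i hne
        refine ih [] _ (by simp) ?_ l hl
        intro l' hl'
        rcases List.mem_cons.mp hl' with h | h
        · subst h
          refine ⟨by simpa using hne, ?_⟩
          intro d hd
          exact hcur d (List.mem_reverse.mp hd)
        · exact hacc l' h
    · rename_i hnotsp
      refine ih (c :: cur) acc ?_ hacc l hl
      intro d hd
      rcases List.mem_cons.mp hd with h | h
      · subst h
        simpa using hnotsp
      · exact hcur d h

theorem split₀_good (s : List Char) : ∀ l ∈ PySem.Chars.split₀ s, goodW l :=
  split₀_go_good s [] [] (by simp) (by simp)

theorem str_split₀_good (s : String) : ∀ w ∈ PySem.Str.split₀ s, goodW w.toList := by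
  intro w hw
  have : w.toList ∈ List.map String.toList (PySem.Str.split₀ s) := List.mem_map_of_mem hw
  rw [PySem.Str.split₀_map_toList] at this
  exact split₀_good _ _ this

-- Chars.join over a snoc
theorem join_snoc (sep w : List Char) (acc : List (List Char)) (h : acc ≠ []) :
    PySem.Chars.join sep (acc ++ [w]) = PySem.Chars.join sep acc ++ sep ++ w := by
  induction acc with
  | nil => simp at h
  | cons a rest ih =>
    cases rest with
    | nil => simp [PySem.Chars.join_cons_cons, PySem.Chars.join_singleton]
    | cons b rs =>
      have h2 : a :: b :: rs ++ [w] = a :: (b :: (rs ++ [w])) := by simp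
      have h3 : b :: (rs ++ [w]) = (b :: rs) ++ [w] := by simp
      rw [h2, PySem.Chars.join_cons_cons, h3, ih (by simp), PySem.Chars.join_cons_cons]
      simp [List.append_assoc]

-- strip is the identity on a string with non-space first and last characters
theorem strip_sandwich (c x : Char) (m : List Char)
    (hc : PySem.Chars.isspace c = false) (hx : PySem.Chars.isspace x = false) :
    PySem.Chars.strip (c :: (m ++ [x])) = c :: (m ++ [x]) := by
  simp [PySem.Chars.strip, PySem.Chars.lstrip, PySem.Chars.rstrip, hc, hx,
    List.reverse_append]

theorem str_join_singleton (sep : String) (w : String) : PySem.Str.join sep [w] = w := by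
  apply String.toList_inj.mp
  rw [PySem.Str.toList_join]
  simp [PySem.Chars.join_singleton]

-- head of a space-join of good words is the (non-space) head of the first word
theorem join_head (acc : List String) (a : String) (rest : List String) (hacc : acc = a :: rest)
    (hg : ∀ w ∈ acc, goodW w.toList) :
    ∃ c t, (PySem.Str.join " " acc).toList = c :: t ∧ PySem.Chars.isspace c = false := by
  subst hacc
  obtain ⟨hne, hsp⟩ := hg a (by simp)
  obtain ⟨c, t0, hct⟩ := List.exists_cons_of_ne_nil hne
  rw [PySem.Str.toList_join]
  cases rest with
  | nil =>
    exact ⟨c, t0, by simp [PySem.Chars.join_singleton, hct], hsp c (by simp [hct])⟩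
  | cons b rs =>
    rw [List.map_cons, List.map_cons, PySem.Chars.join_cons_cons, hct]
    refine ⟨c, t0 ++ ' ' :: PySem.Chars.join [' '] (b.toList :: List.map String.toList rs),
      ?_, hsp c (by simp [hct])⟩
    simp

theorem join_ne_empty (acc : List String) (a : String) (rest : List String) (hacc : acc = a :: rest)
    (hg : ∀ w ∈ acc, goodW w.toList) : PySem.Str.join " " acc ≠ "" := by
  obtain ⟨c, t, hct, -⟩ := join_head acc a rest hacc hg
  intro h
  rw [h] at hct
  simp at hct

-- A's cur update: appending the next word with strip produces the join of the extended group
theorem cur_extend (acc : List String) (hacc : acc ≠ []) (hg : ∀ w ∈ acc, goodW w.toList)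
    (w : String) (hw : goodW w.toList) :
    PySem.Str.strip (PySem.Str.join " " acc ++ " " ++ w) = PySem.Str.join " " (acc ++ [w]) := by
  apply String.toList_inj.mp
  rw [PySem.Str.toList_strip, String.toList_append, String.toList_append, PySem.Str.toList_join,
    PySem.Str.toList_join, List.map_append]
  simp only [List.map_cons, List.map_nil]
  rw [join_snoc _ _ _ (by simpa using hacc)]
  obtain ⟨a, rest, har⟩ := List.exists_cons_of_ne_nil hacc
  obtain ⟨c, t, hct, hc⟩ := join_head acc a rest har hg
  rw [PySem.Str.toList_join] at hct
  rw [hct]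
  obtain ⟨hne, hsp⟩ := hw
  obtain ⟨m, x, hmx⟩ : ∃ m x, w.toList = m ++ [x] :=
    ⟨w.toList.dropLast, w.toList.getLast hne, (List.dropLast_concat_getLast hne).symm⟩
  have hx : PySem.Chars.isspace x = false := hsp x (by simp [hmx])
  rw [hmx]
  have h1 : c :: t ++ " ".toList ++ (m ++ [x]) = c :: ((t ++ " ".toList ++ m) ++ [x]) := by
    simp [List.append_assoc]
  rw [h1, strip_sandwich c x _ hc hx]

theorem len_join_snoc (acc : List String) (hacc : acc ≠ []) (w : String) :
    PySem.Str.len (PySem.Str.join " " (acc ++ [w]))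
      = PySem.Str.len (PySem.Str.join " " acc) + 1 + PySem.Str.len w := by
  rw [PySem.Str.len_eq, PySem.Str.len_eq, PySem.Str.len_eq, PySem.Str.toList_join,
    PySem.Str.toList_join, List.map_append]
  simp only [List.map_cons, List.map_nil]
  rw [join_snoc _ _ _ (by simpa using hacc)]
  simp [List.length_append]
  omega

-- the core loop invariant: A's fold from a current group equals B's greedy grouping
theorem loop_from (mc : Int) (rest : List String) (hrest : ∀ w ∈ rest, goodW w.toList)
    (acc : List String) (hacc : acc ≠ []) (hg : ∀ w ∈ acc, goodW w.toList)
    (lines : List String) :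
    (if (rest.foldl (dotStepA mc) (lines, PySem.Str.join " " acc)).2 ≠ "" then
       (rest.foldl (dotStepA mc) (lines, PySem.Str.join " " acc)).1
         ++ [(rest.foldl (dotStepA mc) (lines, PySem.Str.join " " acc)).2]
     else (rest.foldl (dotStepA mc) (lines, PySem.Str.join " " acc)).1) =
    lines ++ (PySem.Str.join " " (acc ++ (dotTakeGreedy mc (PySem.Str.len (PySem.Str.join " " acc)) rest).1)
      :: dotWrap mc (dotTakeGreedy mc (PySem.Str.len (PySem.Str.join " " acc)) rest).2) := by
  induction rest generalizing acc lines with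
  | nil =>
    obtain ⟨a, r, har⟩ := List.exists_cons_of_ne_nil hacc
    simp [dotTakeGreedy, dotWrap, join_ne_empty acc a r har hg]
  | cons w rest' ih =>
    obtain ⟨a, r, har⟩ := List.exists_cons_of_ne_nil hacc
    have hne := join_ne_empty acc a r har hg
    have hwgood := hrest w (by simp)
    have hrest' : ∀ u ∈ rest', goodW u.toList := fun u hu => hrest u (by simp [hu])
    by_cases hfit : PySem.Str.len (PySem.Str.join " " acc) + 1 + PySem.Str.len w ≤ mc
    · -- word fits: A extends cur, B keeps it in the group
      have hngt : ¬ (PySem.Str.len (PySem.Str.join " " acc) + 1 + PySem.Str.len w > mc) := by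
        omega
      have hstep : dotStepA mc (lines, PySem.Str.join " " acc) w
          = (lines, PySem.Str.join " " (acc ++ [w])) := by
        rw [dotStepA_mk, if_neg (fun hh => hngt hh.2), if_pos hne,
          cur_extend acc hacc hg w hwgood]
      have hacc' : acc ++ [w] ≠ [] := by simp
      have hg' : ∀ u ∈ acc ++ [w], goodW u.toList := by
        intro u hu
        rcases List.mem_append.mp hu with h | h
        · exact hg u h
        · simp at h; subst h; exact hwgood
      have := ih hrest' (acc ++ [w]) hacc' hg' lines
      simp only [List.foldl_cons, hstep]
      rw [this]
      simp only [dotTakeGreedy, if_pos hfit]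
      rw [len_join_snoc acc hacc w]
      simp [List.append_assoc]
    · -- word does not fit: A flushes cur, B closes the group
      have hgt : PySem.Str.len (PySem.Str.join " " acc) + 1 + PySem.Str.len w > mc := by
        omega
      have hstep : dotStepA mc (lines, PySem.Str.join " " acc) w
          = (lines ++ [PySem.Str.join " " acc], w) := by
        rw [dotStepA_mk, if_pos ⟨hne, hgt⟩]
      have := ih hrest' [w] (by simp) (by simpa using hwgood) (lines ++ [PySem.Str.join " " acc])
      rw [str_join_singleton] at this
      simp only [List.foldl_cons, hstep]
      rw [this]
      simp only [dotTakeGreedy, if_neg hfit]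
      rw [dotWrap]
      simp [List.append_assoc]

theorem lines_eq (mc : Int) (words : List String) (hw : ∀ w ∈ words, goodW w.toList) :
    (if (words.foldl (dotStepA mc) ([], "")).2 ≠ "" then
       (words.foldl (dotStepA mc) ([], "")).1 ++ [(words.foldl (dotStepA mc) ([], "")).2]
     else (words.foldl (dotStepA mc) ([], "")).1) = dotWrap mc words := by
  cases words with
  | nil => simp [dotWrap]
  | cons w ws =>
    have hwg := hw w (by simp)
    have hstep : dotStepA mc ([], "") w = ([], w) := by
      rw [dotStepA_mk, if_neg (fun hh => hh.1 rfl), if_neg (fun hh => hh rfl)]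
    have := loop_from mc ws (fun u hu => hw u (by simp [hu])) [w] (by simp)
      (by simpa using hwg) []
    rw [str_join_singleton] at this
    simp only [List.foldl_cons, hstep]
    rw [this, dotWrap]
    simp

-- ===== VERDICT (by name: the statement is the Claim_ definition above) =====
theorem dot_label_py_spec : Claim_equal_dot_label_py := by
  intro text max_chars _
  unfold Spec_dot_label_py
  simp only [dot_label_py, dot_label_py_alt]
  by_cases h : PySem.Str.len (PySem.Str.strip text) ≤ max_chars
  · rw [if_pos h, if_pos h]
  · rw [if_neg h, if_neg h]
    exact congrArg _ (congrArg _ (lines_eq max_chars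
      (PySem.Str.split₀ (PySem.Str.strip text)) (str_split₀_good (PySem.Str.strip text))))
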